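-- pv_equiv track=rewrite | github.com/portworx/support-external-scripts | vm_pvc_mapping/vm_pvc_maping_with_size.py | lookup_node_details
-- ===== SOURCE A (Python) =====
-- def lookup_node_details(node_lines, node_uuids):
--     details = {}
--     if not node_uuids:
--         return details
--
--     for uuid in node_uuids:
--         for line in node_lines:
--             if uuid in line and "Node ID" not in line:
--                 parts = line.split()
--                 if len(parts) >= 2:
--                     details[uuid] = parts[0]
--     return details
-- ===== SOURCE B (Python) =====
-- def lookup_node_details(node_lines, node_uuids):
--     # Stage 1: keep only valid data lines (no "Node ID", >= 2 tokens), each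
--     # paired with its first token, NEWEST FIRST.
--     cands = []
--     for line in reversed(node_lines):
--         if "Node ID" not in line:
--             parts = line.split()
--             if len(parts) >= 2:
--                 cands.append((line, parts[0]))
--     # Stage 2: per uuid, the first (= most recent) containing candidate wins;
--     # the scan stops at the first hit instead of overwriting a dict entry per match.
--     result = {}
--     for uuid in node_uuids:
--         tok = next((tok for line, tok in cands if uuid in line), None)
--         if tok is not None:
--             result[uuid] = tok
--     return result
-- ===== Notes on version B (the rewrite author's own statement) =====
-- stated objective: faster
-- what changed: B replaces A's nested last-match-wins dict-overwrite scan by a staged algorithm: it filters and splits each valid line exactly once into a reversed (newest-first) candidate list, then for each uuid takes the FIRST containing candidate via an early-exit search (next), never overwriting.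
import Mathlib
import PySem

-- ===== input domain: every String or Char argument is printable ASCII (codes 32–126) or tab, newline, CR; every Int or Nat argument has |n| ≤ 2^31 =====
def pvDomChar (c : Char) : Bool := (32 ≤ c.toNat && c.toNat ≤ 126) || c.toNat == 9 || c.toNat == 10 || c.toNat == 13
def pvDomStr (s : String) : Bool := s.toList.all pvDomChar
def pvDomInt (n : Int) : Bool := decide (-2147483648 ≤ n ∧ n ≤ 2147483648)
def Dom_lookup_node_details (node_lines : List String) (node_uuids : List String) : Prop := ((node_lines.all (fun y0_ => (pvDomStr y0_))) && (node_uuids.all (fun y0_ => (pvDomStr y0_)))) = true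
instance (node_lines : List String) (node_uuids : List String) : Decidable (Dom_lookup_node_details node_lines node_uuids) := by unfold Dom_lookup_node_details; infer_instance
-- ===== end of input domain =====

-- B stages the work: filter+split each valid line once into a newest-first candidate list,
-- then per uuid take the FIRST containing candidate (early-exit search), instead of A's nested
-- last-match-wins dict overwriting; same return value, measurably faster in a timing run.

-- ===== PORT A =====
def lookup_node_details (node_lines : List String) (node_uuids : List String) : List (String × String) :=
  let details : PySem.Dict String String := PySem.Dict.empty
  if node_uuids = [] then details.items
  else
    (node_uuids.foldl (fun d uuid =>
      node_lines.foldl (fun d line =>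
        if PySem.Str.isIn uuid line && !(PySem.Str.isIn "Node ID" line) then
          let parts := PySem.Str.split₀ line
          if 2 ≤ parts.length then d.insert uuid (parts.getD 0 "")   -- parts[0], safe: len ≥ 2
          else d
        else d) d) details).items

-- ===== PORT B =====
def lookup_node_details_alt (node_lines : List String) (node_uuids : List String) : List (String × String) :=
  -- stage 1: reversed candidate list (valid line, its first token)
  let cands : List (String × String) := node_lines.reverse.foldl (fun cs line =>
    if !(PySem.Str.isIn "Node ID" line) then
      let parts := PySem.Str.split₀ line
      if 2 ≤ parts.length then cs ++ [(line, parts.getD 0 "")] else cs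
    else cs) []
  -- stage 2: per uuid, first containing candidate (next(..., None))
  (node_uuids.foldl (fun (r : PySem.Dict String String) uuid =>
      match (cands.find? (fun c => PySem.Str.isIn uuid c.1)).map Prod.snd with
      | some tok => r.insert uuid tok
      | none => r) PySem.Dict.empty).items

-- ===== PRECONDITION & SPEC =====
def Spec_lookup_node_details (node_lines : List String) (node_uuids : List String) (out : List (String × String)) : Prop := out = lookup_node_details_alt node_lines node_uuids
instance (node_lines : List String) (node_uuids : List String) (out : List (String × String)) : Decidable (Spec_lookup_node_details node_lines node_uuids out) := by unfold Spec_lookup_node_details; infer_instance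

-- ===== CLAIM =====
def Claim_equal_lookup_node_details : Prop := ∀ (node_lines : List String) (node_uuids : List String), Dom_lookup_node_details node_lines node_uuids → Spec_lookup_node_details node_lines node_uuids (lookup_node_details node_lines node_uuids)

-- ===== LEMMAS AND PROOFS =====

-- the value A records for uuid u from a single line, if any
def pvMatch (line u : String) : Option String :=
  if PySem.Str.isIn u line && !(PySem.Str.isIn "Node ID" line) then
    if 2 ≤ (PySem.Str.split₀ line).length then some ((PySem.Str.split₀ line).getD 0 "")
    else none
  else none

-- the value recorded for u after A scans all lines (later lines win)
def pvLast : List String → String → Option String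
  | [], _ => none
  | l :: ls, u =>
    match pvLast ls u with
    | some v => some v
    | none => pvMatch l u

-- first match scanning front-to-back (B's view of the reversed list)
def pvFirst : List String → String → Option String
  | [], _ => none
  | l :: ls, u =>
    match pvMatch l u with
    | some v => some v
    | none => pvFirst ls u

-- B's candidate for one line
def pvCand (line : String) : Option (String × String) :=
  if !(PySem.Str.isIn "Node ID" line) then
    if 2 ≤ (PySem.Str.split₀ line).length then some (line, (PySem.Str.split₀ line).getD 0 "")
    else none
  else none

-- A's inner loop over the lines, for a fixed uuid, is one conditional insert of pvLast
theorem pvA_inner (lines : List String) (u : String) (d : PySem.Dict String String) :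
    lines.foldl (fun d line =>
        if PySem.Str.isIn u line && !(PySem.Str.isIn "Node ID" line) then
          let parts := PySem.Str.split₀ line
          if 2 ≤ parts.length then d.insert u (parts.getD 0 "")
          else d
        else d) d
    = match pvLast lines u with
      | some v => d.insert u v
      | none => d := by
  induction lines generalizing d with
  | nil => simp [pvLast]
  | cons l ls ih =>
    rw [List.foldl_cons, ih]
    simp only [pvLast, pvMatch]
    cases h : pvLast ls u with
    | some v =>
      dsimp only
      split_ifs <;> first | rw [PySem.Dict.insert_insert_self] | rfl
    | none =>
      dsimp only
      split_ifs <;> rfl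

-- B's stage-1 fold builds exactly the filterMap of pvCand
theorem pvB_cands (L : List String) (acc : List (String × String)) :
    L.foldl (fun cs line =>
      if !(PySem.Str.isIn "Node ID" line) then
        if 2 ≤ (PySem.Str.split₀ line).length then cs ++ [(line, (PySem.Str.split₀ line).getD 0 "")] else cs
      else cs) acc
    = acc ++ L.filterMap pvCand := by
  induction L generalizing acc with
  | nil => simp
  | cons l ls ih =>
    rw [List.foldl_cons, List.filterMap_cons]
    by_cases h1 : PySem.Str.isIn "Node ID" l = true
    · have hc : pvCand l = none := by unfold pvCand; rw [h1]; simp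
      rw [hc, h1]
      simp only [Bool.not_true]
      rw [if_neg (by simp), ih]
    · have h1' : PySem.Str.isIn "Node ID" l = false := eq_false_of_ne_true h1
      have hcnd : (!PySem.Str.isIn "Node ID" l) = true := by rw [h1']; rfl
      by_cases h2 : 2 ≤ (PySem.Str.split₀ l).length
      · have hc : pvCand l = some (l, (PySem.Str.split₀ l).getD 0 "") := by
          unfold pvCand; rw [h1']; simp [h2]
        rw [hc, if_pos hcnd, if_pos h2, ih, List.append_assoc, List.singleton_append]
      · have hc : pvCand l = none := by unfold pvCand; rw [h1']; simp [h2]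
        rw [hc, if_pos hcnd, if_neg h2, ih]

-- B's stage-2 search over the candidates of L is pvFirst L
theorem pvB_find (L : List String) (u : String) :
    ((L.filterMap pvCand).find? (fun c => PySem.Str.isIn u c.1)).map Prod.snd
    = pvFirst L u := by
  induction L with
  | nil => simp [pvFirst]
  | cons l ls ih =>
    rw [List.filterMap_cons]
    by_cases hnode : PySem.Str.isIn "Node ID" l = true
    · have hc : pvCand l = none := by unfold pvCand; rw [hnode]; simp
      have hm : pvMatch l u = none := by unfold pvMatch; rw [hnode]; simp
      rw [hc]
      simp only [pvFirst, hm, ih]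
    · have h1' : PySem.Str.isIn "Node ID" l = false := eq_false_of_ne_true hnode
      by_cases hlen : 2 ≤ (PySem.Str.split₀ l).length
      · have hc : pvCand l = some (l, (PySem.Str.split₀ l).getD 0 "") := by
          unfold pvCand; rw [h1']; simp [hlen]
        rw [hc]
        cases hin : PySem.Str.isIn u l with
        | true =>
          have hm : pvMatch l u = some ((PySem.Str.split₀ l).getD 0 "") := by
            unfold pvMatch; rw [hin, h1']; simp [hlen]
          simp only [pvFirst, hm, List.find?_cons, hin]
          rfl
        | false =>
          have hm : pvMatch l u = none := by unfold pvMatch; rw [hin]; simp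
          simp only [pvFirst, hm, List.find?_cons, hin, ih]
      · have hc : pvCand l = none := by unfold pvCand; rw [h1']; simp [hlen]
        have hm : pvMatch l u = none := by unfold pvMatch; simp [hlen]
        rw [hc]
        simp only [pvFirst, hm, ih]

-- pvFirst distributes over append
theorem pvFirst_append (xs ys : List String) (u : String) :
    pvFirst (xs ++ ys) u
    = match pvFirst xs u with
      | some v => some v
      | none => pvFirst ys u := by
  induction xs with
  | nil => simp [pvFirst]
  | cons x xs ih =>
    simp only [List.cons_append, pvFirst, ih]
    cases pvMatch x u <;> rfl

-- last match forward = first match on the reverse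
theorem pvLast_eq_pvFirst_reverse (L : List String) (u : String) :
    pvLast L u = pvFirst L.reverse u := by
  induction L with
  | nil => rfl
  | cons l ls ih =>
    simp only [pvLast, List.reverse_cons, pvFirst_append, ih]
    cases pvFirst ls.reverse u with
    | some v => rfl
    | none =>
      simp only [pvFirst]
      cases pvMatch l u <;> rfl

-- ===== VERDICT =====
theorem lookup_node_details_spec : Claim_equal_lookup_node_details := by
  intro lines uuids _
  unfold Spec_lookup_node_details
  simp only [lookup_node_details, lookup_node_details_alt]
  by_cases hnil : uuids = []
  · simp [hnil]
  · rw [if_neg hnil, pvB_cands]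
    congr 1
    apply PySem.List.foldl_congr_mem
    intro d u hu
    rw [pvA_inner, List.nil_append, pvB_find, ← pvLast_eq_pvFirst_reverse]
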